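-- pv_equiv track=rewrite | github.com/jluby127/optimalAllocation | helperFunctions.py | buildTwilightMap
-- ===== SOURCE A (Python) =====
-- def buildTwilightMap(windowsPerNight, nSlotsInQuarter):
--
--     nightly_twilight_map = []
--     for i in range(len(windowsPerNight)):
--
--         quarterslots = [0]*nSlotsInQuarter
--         for j in range(nSlotsInQuarter):
--
-- #             # due to large/quantized slot sizes, some "leftover" twilight time might get evenly spread across the 4
-- #             # quarters of the night. But we don't want that. If any twilight time is left over, then all that is
-- #             # spread across the quarters should be "rounded up" so that one extra slot is not available for targets.
-- #             # this is merely encoding into the human readable schedule what the algorith is implicity doing.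
-- #             # So that we don't penalize ourselves for not filling all slots that the schedule shows are available, when
-- #             # in reality they are not available.
--
-- #             if windowsPerNight[i]%4 == 1:
-- #                 extra = 1
-- #             elif windowsPerNight[i]%4 == 3:
-- #                 extra = 0
-- #             else:
-- #                 extra = 0
-- #             # end logic here and resume normal operations
--
--             extra = 0
--             if j > int(windowsPerNight[i]/4) - extra:
--                 quarterslots[j] = 1
--         quarterslots.extend(quarterslots)
--         # second 'extend' is doubling the already doubled length
--         quarterslots.extend(quarterslots)
--         nightly_twilight_map.append(quarterslots)
--     return nightly_twilight_map
-- ===== SOURCE B (Python) =====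
-- def buildTwilightMap(windowsPerNight, nSlotsInQuarter):
--     # A night's row depends only on t = int(w/4): stage 1 builds each distinct
--     # row once into an index keyed by t; stage 2 maps every night to its row.
--     rows = {}
--     for w in windowsPerNight:
--         t = int(w / 4)
--         if t not in rows:
--             z = min(max(t + 1, 0), nSlotsInQuarter)
--             rows[t] = ([0] * z + [1] * (nSlotsInQuarter - z)) * 4
--     return [rows[int(w / 4)] for w in windowsPerNight]
-- ===== Notes on version B (the rewrite author's own statement) =====
-- stated objective: alternative
-- what changed: Replaces A's per-night per-slot branching loop plus two self-extend doublings by a two-stage memoized build: a dictionary of rows keyed by the distinct cutoffs t=int(w/4), each row built once in closed form as ([0]*z+[1]*(n-z))*4 with z=clamp(t+1,0,n), followed by a lookup pass; duplicate cutoffs cost one dict lookup instead of rebuilding the row.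
import Mathlib
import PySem

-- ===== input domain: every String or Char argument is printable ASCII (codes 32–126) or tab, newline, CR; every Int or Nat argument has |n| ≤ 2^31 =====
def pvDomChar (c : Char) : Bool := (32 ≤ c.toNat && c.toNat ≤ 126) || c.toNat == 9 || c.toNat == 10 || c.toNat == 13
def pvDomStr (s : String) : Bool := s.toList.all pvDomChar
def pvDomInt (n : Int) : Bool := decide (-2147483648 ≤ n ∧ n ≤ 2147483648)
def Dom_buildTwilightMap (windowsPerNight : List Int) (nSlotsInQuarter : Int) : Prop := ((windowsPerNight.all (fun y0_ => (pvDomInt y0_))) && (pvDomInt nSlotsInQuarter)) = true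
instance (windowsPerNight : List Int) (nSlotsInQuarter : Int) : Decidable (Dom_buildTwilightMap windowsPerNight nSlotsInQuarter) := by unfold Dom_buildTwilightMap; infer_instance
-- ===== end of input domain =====

-- B replaces the per-slot branching loop and double self-extend by a two-stage memoized
-- build: a dict of rows keyed by the distinct cutoffs t=int(w/4), then a lookup pass.


-- ===== PORT A =====
-- body of A's outer loop for one night: the [0]*n list, the per-slot branching loop,
-- then the two self-extends.  int(w/4) is PySem.Int.truncdiv w 4 (exact, |w| ≤ 2^31);
-- j comes from range(nSlotsInQuarter) so 0 ≤ j and j.toNat is the exact Python index.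
def pvRowA (w nSlotsInQuarter : Int) : List Int :=
  let extra : Int := 0
  let quarterslots :=
    (PySem.List.pyRange 0 nSlotsInQuarter 1).foldl
      (fun qs j => if PySem.Int.truncdiv w 4 - extra < j then qs.set j.toNat 1 else qs)
      (List.replicate nSlotsInQuarter.toNat 0)
  let qs2 := quarterslots ++ quarterslots
  qs2 ++ qs2

def buildTwilightMap (windowsPerNight : List Int) (nSlotsInQuarter : Int) : List (List Int) :=
  (PySem.List.pyRange 0 (PySem.List.len windowsPerNight) 1).foldl
    (fun acc i => acc ++ [pvRowA (PySem.List.pyGetD windowsPerNight i 0) nSlotsInQuarter]) []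

-- ===== PORT B =====
-- the row B builds once for a cutoff t: ([0]*z + [1]*(n-z)) * 4
def pvRowB (t n : Int) : List Int :=
  let z := min (max (t + 1) 0) n
  let base := List.replicate z.toNat 0 ++ List.replicate (n - z).toNat 1
  base ++ base ++ base ++ base

-- stage 1: index the distinct cutoffs ('if t not in rows: rows[t] = …');
-- stage 2: lookup pass.  rows[t] always hits because stage 1 inserted every
-- cutoff of ws, so getD with default [] is the faithful lookup (no KeyError).
def buildTwilightMap_alt (windowsPerNight : List Int) (nSlotsInQuarter : Int) : List (List Int) :=
  let rows : PySem.Dict Int (List Int) :=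
    windowsPerNight.foldl
      (fun d w =>
        let t := PySem.Int.truncdiv w 4
        if d.contains t then d else d.insert t (pvRowB t nSlotsInQuarter))
      PySem.Dict.empty
  windowsPerNight.map (fun w => rows.getD (PySem.Int.truncdiv w 4) [])

-- ===== PRECONDITION & SPEC =====
def Spec_buildTwilightMap (windowsPerNight : List Int) (nSlotsInQuarter : Int) (out : List (List Int)) : Prop := out = buildTwilightMap_alt windowsPerNight nSlotsInQuarter
instance (windowsPerNight : List Int) (nSlotsInQuarter : Int) (out : List (List Int)) : Decidable (Spec_buildTwilightMap windowsPerNight nSlotsInQuarter out) := by unfold Spec_buildTwilightMap; infer_instance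

-- ===== CLAIM (what is proved, stated in full; the proofs are below) =====
def Claim_equal_buildTwilightMap : Prop := ∀ (windowsPerNight : List Int) (nSlotsInQuarter : Int), Dom_buildTwilightMap windowsPerNight nSlotsInQuarter → Spec_buildTwilightMap windowsPerNight nSlotsInQuarter (buildTwilightMap windowsPerNight nSlotsInQuarter)

-- ===== LEMMAS AND PROOFS =====

-- A's inner loop, run up to m ≤ n slots, elementwise
lemma pvFold_eq (t : Int) (n : Nat) : ∀ m : Nat, m ≤ n →
    (PySem.List.pyRange 0 (m : Int) 1).foldl
      (fun qs j => if t < j then qs.set j.toNat 1 else qs)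
      (List.replicate n (0 : Int))
    = (List.range n).map (fun (j : Nat) => if (j : Int) < (m : Int) ∧ t < (j : Int) then (1:Int) else 0) := by
  intro m
  induction m with
  | zero =>
    intro _
    rw [PySem.List.pyRange_one_eq_nil (by omega)]
    apply List.ext_getElem (by simp)
    intro k hk hk'
    simp
  | succ m ih =>
    intro hm
    have h1 : ((m + 1 : Nat) : Int) = (m : Int) + 1 := by push_cast; ring
    rw [h1, PySem.List.pyRange_one_succ_right (by omega), List.foldl_append, ih (by omega)]
    simp only [List.foldl_cons, List.foldl_nil]
    by_cases ht : t < (m : Int)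
    · rw [if_pos ht]
      apply List.ext_getElem (by simp)
      intro k hk hk'
      simp only [List.getElem_set, List.getElem_map, List.getElem_range, Int.toNat_natCast]
      have hkm : (k : Int) < (m : Int) ↔ k < m := by exact_mod_cast Iff.rfl
      split_ifs <;> omega
    · rw [if_neg ht]
      apply List.ext_getElem (by simp)
      intro k hk hk'
      simp only [List.getElem_map, List.getElem_range]
      have hiff : ((k : Int) < (m : Int) ∧ t < (k : Int)) ↔
          ((k : Int) < (m : Int) + 1 ∧ t < (k : Int)) := by
        constructor <;> rintro ⟨ha, hb⟩ <;> exact ⟨by omega, hb⟩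
      exact if_congr hiff rfl rfl

-- the finished slot list equals B's closed-form base
lemma pvMap_eq_base (t : Int) (n : Nat) :
    (List.range n).map (fun (j : Nat) => if (j : Int) < (n : Int) ∧ t < (j : Int) then (1:Int) else 0)
    = List.replicate (min (max (t + 1) 0) (n : Int)).toNat (0 : Int)
      ++ List.replicate ((n : Int) - min (max (t + 1) 0) (n : Int)).toNat 1 := by
  apply List.ext_getElem (by simp; omega)
  intro k hk hk'
  have hkn : k < n := by simpa using hk
  simp only [List.getElem_map, List.getElem_range, List.getElem_append,
    List.length_replicate, List.getElem_replicate]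
  split_ifs with h1 h2 h2 <;> omega

-- one night: A's row equals B's row for the cutoff t = int(w/4)
lemma pvRow_eq (w n : Int) : pvRowA w n = pvRowB (PySem.Int.truncdiv w 4) n := by
  unfold pvRowA pvRowB
  simp only [sub_zero]
  set t := PySem.Int.truncdiv w 4 with ht
  by_cases hn : n ≤ 0
  · have hz : min (max (t + 1) 0) n = n := by omega
    rw [PySem.List.pyRange_one_eq_nil (by omega)]
    simp [hz, Int.toNat_of_nonpos hn]
  · have hN : n = ((n.toNat : Nat) : Int) := by omega
    rw [hN, Int.toNat_natCast,
      pvFold_eq t n.toNat n.toNat (le_refl _), pvMap_eq_base t n.toNat]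
    simp only [List.append_assoc]

-- the dict step B performs
def pvStep (n : Int) (d : PySem.Dict Int (List Int)) (w : Int) : PySem.Dict Int (List Int) :=
  let t := PySem.Int.truncdiv w 4
  if d.contains t then d else d.insert t (pvRowB t n)

-- once a key is in the dict it stays in through B's stage-1 fold
lemma pvContains_mono (n : Int) (ws : List Int) :
    ∀ (d : PySem.Dict Int (List Int)) (k : Int), d.contains k = true →
    (ws.foldl (pvStep n) d).contains k = true := by
  induction ws with
  | nil => exact fun d k h => h
  | cons x xs ihx =>
    intro d k h
    apply ihx
    unfold pvStep
    by_cases hc : d.contains (PySem.Int.truncdiv x 4)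
    · simpa [hc]
    · simp only [hc, if_neg, Bool.false_eq_true, not_false_iff]
      rw [PySem.Dict.contains_insert]
      simp [h]

-- invariant + coverage of B's stage-1 fold: every stored value is the right row,
-- and every cutoff of ws ends up stored
lemma pvDict_inv (n : Int) : ∀ (ws : List Int) (d : PySem.Dict Int (List Int)),
    (∀ k v, d.get? k = some v → v = pvRowB k n) →
    (∀ k v, (ws.foldl (pvStep n) d).get? k = some v → v = pvRowB k n) ∧
    (∀ w ∈ ws, (ws.foldl (pvStep n) d).getD (PySem.Int.truncdiv w 4) [] = pvRowB (PySem.Int.truncdiv w 4) n) := by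
  intro ws
  induction ws with
  | nil => intro d hd; exact ⟨hd, by simp⟩
  | cons w ws ih =>
    intro d hd
    have hstep : ∀ k v, (pvStep n d w).get? k = some v → v = pvRowB k n := by
      intro k v hkv
      unfold pvStep at hkv
      by_cases hc : d.contains (PySem.Int.truncdiv w 4)
      · exact hd k v (by simpa [hc] using hkv)
      · simp only [hc, if_neg, Bool.false_eq_true, not_false_iff] at hkv
        rw [PySem.Dict.get?_insert] at hkv
        by_cases hk : k = PySem.Int.truncdiv w 4
        · rw [if_pos hk] at hkv; subst hk; exact (Option.some_inj.mp hkv).symm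
        · exact hd k v (by rwa [if_neg hk] at hkv)
    have hcontains : (pvStep n d w).contains (PySem.Int.truncdiv w 4) = true := by
      unfold pvStep
      by_cases hc : d.contains (PySem.Int.truncdiv w 4) <;>
        simp [hc, PySem.Dict.contains_insert_self]
    obtain ⟨hinv, hcov⟩ := ih (pvStep n d w) hstep
    refine ⟨by simpa using hinv, ?_⟩
    intro x hx
    rcases List.mem_cons.mp hx with rfl | hx'
    · have hc := pvContains_mono n ws (pvStep n d x) (PySem.Int.truncdiv x 4) hcontains
      have := PySem.Dict.contains_eq_isSome_get?
        (d := ws.foldl (pvStep n) (pvStep n d x)) (k := PySem.Int.truncdiv x 4)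
      rw [this] at hc
      obtain ⟨v, hv⟩ := Option.isSome_iff_exists.mp hc
      have hveq := hinv (PySem.Int.truncdiv x 4) v (by simpa using hv)
      simp only [List.foldl_cons]
      rw [PySem.Dict.getD_eq_get?_getD, hv]
      simpa using hveq
    · simpa using hcov x hx'

theorem pvMain : ∀ (windowsPerNight : List Int) (nSlotsInQuarter : Int),
    buildTwilightMap windowsPerNight nSlotsInQuarter
    = buildTwilightMap_alt windowsPerNight nSlotsInQuarter := by
  intro ws n
  unfold buildTwilightMap buildTwilightMap_alt
  rw [PySem.List.foldl_pyRange_zero_pyGetD ws 0 (fun acc w => acc ++ [pvRowA w n]) []]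
  rw [PySem.List.foldl_append_singleton_eq_map]
  have hcov := (pvDict_inv n ws PySem.Dict.empty (by simp [PySem.Dict.get?_empty])).2
  simp only [List.nil_append]
  apply List.map_congr_left
  intro w hw
  rw [pvRow_eq w n]
  exact (hcov w hw).symm

-- ===== VERDICT (by name: the statement is the Claim_ definition above) =====
theorem buildTwilightMap_spec : Claim_equal_buildTwilightMap := by
  intro ws n _
  unfold Spec_buildTwilightMap
  exact pvMain ws n
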